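-- pv_equiv track=rewrite | github.com/navipilot/openpilot | selfdrive/ui/layouts/home.py | _build_latest_text
-- ===== SOURCE A (Python) =====
-- def _build_latest_text(content: str) -> str:
--   lines = content.splitlines()
--   if not lines:
--     return "No updates available."
--
--   out: list[str] = []
--   section_count = 0
--   for line in lines:
--     if line.startswith("## "):
--       section_count += 1
--       if section_count > 2:
--         break
--     out.append(line)
--   return "\n".join(out).strip() or content
-- ===== SOURCE B (Python) =====
-- def _build_latest_text(content: str) -> str:
--   lines = content.splitlines()
--   if not lines:
--     return "No updates available."
--   headers = [i for i, line in enumerate(lines) if line.startswith("## ")]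
--   cut = headers[2] if len(headers) > 2 else len(lines)
--   return "\n".join(lines[:cut]).strip() or content
-- ===== Notes on version B (the rewrite author's own statement) =====
-- stated objective: alternative
-- what changed: B replaces A's single loop with a break and a section counter by an index table: a comprehension collects the indices of all section-header lines, the cut point is the third header's index (or the end), and the result is one join of the sliced prefix.
import Mathlib
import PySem

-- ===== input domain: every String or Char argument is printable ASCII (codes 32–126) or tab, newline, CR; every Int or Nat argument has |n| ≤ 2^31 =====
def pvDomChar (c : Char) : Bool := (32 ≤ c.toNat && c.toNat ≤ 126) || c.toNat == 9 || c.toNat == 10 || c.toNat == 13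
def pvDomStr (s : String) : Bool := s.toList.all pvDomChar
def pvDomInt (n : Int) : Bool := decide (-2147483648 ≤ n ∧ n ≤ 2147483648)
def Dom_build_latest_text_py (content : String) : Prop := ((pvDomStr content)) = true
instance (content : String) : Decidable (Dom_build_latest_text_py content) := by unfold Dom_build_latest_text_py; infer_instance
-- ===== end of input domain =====

-- B replaces A's break-on-third-header loop by an index table of section-header positions and one slice; alternative decomposition, same cost.

-- ===== PORT A =====
-- the for-loop of A: state (out, section_count); break returns out unchanged
def buildLatestLoopA : List String → List String → Nat → List String
  | [], out, _ => out
  | line :: rest, out, cnt =>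
    if PySem.Str.startswith line "## " then
      if cnt + 1 > 2 then out
      else buildLatestLoopA rest (out ++ [line]) (cnt + 1)
    else buildLatestLoopA rest (out ++ [line]) cnt

def build_latest_text_py (content : String) : String :=
  let lines := PySem.Str.splitlines content
  if lines = [] then "No updates available."
  else
    let out := buildLatestLoopA lines [] 0
    let t := PySem.Str.strip (PySem.Str.join "\n" out)
    if t = "" then content else t

-- ===== PORT B =====
def build_latest_text_py_alt (content : String) : String :=
  let lines := PySem.Str.splitlines content
  if lines = [] then "No updates available."
  else
    let headers := ((PySem.List.enumerate lines).filter
      (fun p => PySem.Str.startswith p.2 "## ")).map (·.1)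
    -- headers[2] is guarded by len(headers) > 2, so the lookup cannot miss; getD 0 is never its default
    let cut : Int := if headers.length > 2 then (PySem.List.pyGet? headers 2).getD 0
                     else (lines.length : Int)
    let t := PySem.Str.strip (PySem.Str.join "\n" (PySem.List.slice lines none (some cut)))
    if t = "" then content else t

-- ===== PRECONDITION & SPEC =====
def Spec_build_latest_text_py (content : String) (out : String) : Prop := out = build_latest_text_py_alt content
instance (content : String) (out : String) : Decidable (Spec_build_latest_text_py content out) := by unfold Spec_build_latest_text_py; infer_instance

-- ===== CLAIM (what is proved, stated in full; the proofs are below) =====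
def Claim_equal_build_latest_text_py : Prop := ∀ (content : String), Dom_build_latest_text_py content → Spec_build_latest_text_py content (build_latest_text_py content)

-- ===== LEMMAS AND PROOFS =====

-- common spec: keep lines until the (a+1)-th header (exclusive)
def keepG : List String → Nat → List String
  | [], _ => []
  | l :: rest, a =>
    if PySem.Str.startswith l "## " then
      match a with
      | 0 => []
      | a' + 1 => l :: keepG rest a'
    else l :: keepG rest a

theorem loopA_eq_keepG (lines : List String) : ∀ (out : List String) (c : Nat), c ≤ 2 →
    buildLatestLoopA lines out c = out ++ keepG lines (2 - c) := by
  induction lines with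
  | nil => intro out c _; simp [buildLatestLoopA, keepG]
  | cons l rest ih =>
    intro out c hc
    by_cases h : PySem.Str.startswith l "## "
    · simp only [buildLatestLoopA, keepG, h, if_pos]
      by_cases h2 : c + 1 > 2
      · have : c = 2 := by omega
        subst this
        simp
      · have hlt : c < 2 := by omega
        rw [if_neg h2, ih (out ++ [l]) (c + 1) (by omega)]
        have : 2 - c = (2 - (c + 1)) + 1 := by omega
        rw [this]
        simp
    · simp only [buildLatestLoopA, keepG, h, Bool.false_eq_true, if_false]
      rw [ih (out ++ [l]) c hc]
      simp

-- every header index collected from enumerate from s is ≥ s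
theorem headers_ge (lines : List String) (s : Int) :
    ∀ x ∈ ((PySem.List.enumerate lines s).filter (fun p => PySem.Str.startswith p.2 "## ")).map (·.1),
      s ≤ x := by
  intro x hx
  simp only [List.mem_map, List.mem_filter] at hx
  obtain ⟨p, ⟨hp, _⟩, rfl⟩ := hx
  rw [PySem.List.mem_enumerate_iff] at hp
  obtain ⟨k, _, rfl⟩ := hp
  simp only
  omega

theorem keepG_eq_take (lines : List String) : ∀ (s : Int) (a : Nat),
    keepG lines a =
      match (((PySem.List.enumerate lines s).filter (fun p => PySem.Str.startswith p.2 "## ")).map (·.1))[a]? with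
      | some x => lines.take (x - s).toNat
      | none => lines := by
  induction lines with
  | nil => intro s a; simp [keepG, PySem.List.enumerate]
  | cons l rest ih =>
    intro s a
    rw [PySem.List.enumerate_cons]
    by_cases h : PySem.Str.startswith l "## "
    · simp only [List.filter_cons, h, if_pos, List.map_cons]
      cases a with
      | zero =>
        simp only [List.getElem?_cons_zero, keepG, h, if_pos]
        simp
      | succ a' =>
        simp only [keepG, h, if_pos, List.getElem?_cons_succ]
        rw [ih (s + 1) a']
        cases hx : (((PySem.List.enumerate rest (s + 1)).filter (fun p => PySem.Str.startswith p.2 "## ")).map (·.1))[a']? with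
        | none => simp
        | some x =>
          have hxmem : x ∈ ((PySem.List.enumerate rest (s + 1)).filter (fun p => PySem.Str.startswith p.2 "## ")).map (·.1) :=
            List.mem_of_getElem? hx
          have hge : s + 1 ≤ x := headers_ge rest (s + 1) x hxmem
          have : (x - s).toNat = (x - (s + 1)).toNat + 1 := by omega
          simp [this]
    · simp only [List.filter_cons, h]
      simp only [keepG, h, if_neg, Bool.false_eq_true, not_false_iff]
      rw [ih (s + 1) a]
      cases hx : (((PySem.List.enumerate rest (s + 1)).filter (fun p => PySem.Str.startswith p.2 "## ")).map (·.1))[a]? with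
      | none => simp
      | some x =>
        have hxmem : x ∈ ((PySem.List.enumerate rest (s + 1)).filter (fun p => PySem.Str.startswith p.2 "## ")).map (·.1) :=
          List.mem_of_getElem? hx
        have hge : s + 1 ≤ x := headers_ge rest (s + 1) x hxmem
        have : (x - s).toNat = (x - (s + 1)).toNat + 1 := by omega
        simp [this]

-- ===== VERDICT (by name: the statement is the Claim_ definition above) =====
theorem build_latest_text_py_spec : Claim_equal_build_latest_text_py := by
  intro content _
  unfold Spec_build_latest_text_py build_latest_text_py build_latest_text_py_alt
  set lines := PySem.Str.splitlines content with hlines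
  by_cases hnil : lines = []
  · simp [hnil]
  · simp only [hnil, if_neg, not_false_iff]
    set hs := ((PySem.List.enumerate lines).filter (fun p => PySem.Str.startswith p.2 "## ")).map (·.1) with hhs
    have key : buildLatestLoopA lines [] 0 =
        PySem.List.slice lines none (some (if hs.length > 2 then (PySem.List.pyGet? hs 2).getD 0 else (lines.length : Int))) := by
      rw [loopA_eq_keepG lines [] 0 (by omega), List.nil_append]
      rw [keepG_eq_take lines 0 2]
      by_cases hlen : hs.length > 2
      · cases hget : hs[2]? with
        | none =>
          exfalso
          rw [List.getElem?_eq_none_iff] at hget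
          omega
        | some x =>
          have hxmem : x ∈ hs := List.mem_of_getElem? hget
          have hge : (0 : Int) ≤ x := headers_ge lines 0 x (by rw [hhs] at hxmem; simpa using hxmem)
          have hpg : PySem.List.pyGet? hs 2 = some x := by
            rw [show ((2:Int)) = ((2:Nat):Int) by norm_num, PySem.List.pyGet?_natCast]
            exact hget
          rw [if_pos hlen, hpg]
          simp only [Option.getD_some]
          rw [PySem.List.slice_to _ hge]
          simp
      · rw [if_neg hlen]
        have hnone : hs[2]? = none := List.getElem?_eq_none (by omega)
        rw [← hhs, hnone]
        rw [show ((lines.length : Int)) = ((lines.length : Nat) : Int) by norm_num,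
          PySem.List.slice_to_natCast]
        simp
    rw [key]
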